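-- pv_equiv track=rewrite | github.com/kingsbalfx/jaguar | ict_trading_bot/backtest/setup_occurrence.py | _select_match_level
-- ===== SOURCE A (Python) =====
-- def _select_match_level(level_stats, min_occurrences):
--     ordered_levels = ("exact", "same_symbol", "asset_class")
--     for level in ordered_levels:
--         if level_stats[level]["occurrences"] >= min_occurrences:
--             return level
--
--     populated_levels = [
--         (level, level_stats[level]["occurrences"])
--         for level in ordered_levels
--         if level_stats[level]["occurrences"] > 0
--     ]
--     if populated_levels:
--         populated_levels.sort(key=lambda item: (-item[1], ordered_levels.index(item[0])))
--         return populated_levels[0][0]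
--     return "exact"
-- ===== SOURCE B (Python) =====
-- def _select_match_level(level_stats, min_occurrences):
--     ordered_levels = ("exact", "same_symbol", "asset_class")
--     for level in ordered_levels:
--         if level_stats[level]["occurrences"] >= min_occurrences:
--             return level
--     best = max(ordered_levels, key=lambda l: level_stats[l]["occurrences"])
--     return best if level_stats[best]["occurrences"] > 0 else "exact"
-- ===== Notes on version B (the rewrite author's own statement) =====
-- stated objective: simpler
-- what changed: The fallback that builds a filtered (level, occurrences) list, sorts it by (-occurrences, priority index) and takes the head is replaced by a single max() scan over the three levels (first maximum wins ties, matching the sort's tie-break) followed by an occurrences > 0 post-check.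
import Mathlib
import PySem

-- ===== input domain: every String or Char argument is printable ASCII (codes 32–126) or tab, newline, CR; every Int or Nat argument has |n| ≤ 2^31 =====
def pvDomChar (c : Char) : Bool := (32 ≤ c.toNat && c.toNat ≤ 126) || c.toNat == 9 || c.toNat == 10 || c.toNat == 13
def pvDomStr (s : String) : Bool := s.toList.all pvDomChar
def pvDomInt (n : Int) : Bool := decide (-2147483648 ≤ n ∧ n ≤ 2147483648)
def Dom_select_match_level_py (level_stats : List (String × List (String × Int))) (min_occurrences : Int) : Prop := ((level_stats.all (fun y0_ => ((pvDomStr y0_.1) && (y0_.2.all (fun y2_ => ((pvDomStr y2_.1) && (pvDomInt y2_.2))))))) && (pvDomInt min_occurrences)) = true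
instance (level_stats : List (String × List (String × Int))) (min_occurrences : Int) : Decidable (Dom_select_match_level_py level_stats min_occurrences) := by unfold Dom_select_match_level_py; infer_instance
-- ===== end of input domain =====

-- B replaces A's build-filter-sort fallback by a single first-max scan with a positivity post-check (objective: simpler).


-- ===== PORT A =====
-- ordered_levels, shared by both Pythons
def pvLevels : List String := ["exact", "same_symbol", "asset_class"]

-- level_stats[l]["occurrences"]; total via getD 0 — Pre_ guarantees both lookups succeed (else Python raises KeyError)
def pvOcc (level_stats : List (String × List (String × Int))) (l : String) : Int :=
  (((PySem.Dict.ofList level_stats).get? l).bind (fun d => (PySem.Dict.ofList d).get? "occurrences")).getD 0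

def select_match_level_py (level_stats : List (String × List (String × Int))) (min_occurrences : Int) : String :=
  -- for level in ordered_levels: if ... >= min_occurrences: return level
  if pvOcc level_stats "exact" ≥ min_occurrences then "exact"
  else if pvOcc level_stats "same_symbol" ≥ min_occurrences then "same_symbol"
  else if pvOcc level_stats "asset_class" ≥ min_occurrences then "asset_class"
  else
    let populated := (pvLevels.filter (fun l => pvOcc level_stats l > 0)).map
      (fun l => (l, pvOcc level_stats l))
    match PySem.List.sorted2 populated (fun it => -it.2)
        (fun it => ((PySem.List.index? pvLevels it.1).getD 0 : Nat)) false with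
    | [] => "exact"
    | p :: _ => p.1

-- ===== PORT B =====
def select_match_level_py_alt (level_stats : List (String × List (String × Int))) (min_occurrences : Int) : String :=
  if pvOcc level_stats "exact" ≥ min_occurrences then "exact"
  else if pvOcc level_stats "same_symbol" ≥ min_occurrences then "same_symbol"
  else if pvOcc level_stats "asset_class" ≥ min_occurrences then "asset_class"
  else
    -- best = max(ordered_levels, key=...) ; pvLevels is nonempty so the default is never used
    let best := (PySem.List.max? pvLevels (fun l => pvOcc level_stats l)).getD "exact"
    if pvOcc level_stats best > 0 then best else "exact"

-- ===== PRECONDITION & SPEC =====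
-- does level_stats[l]["occurrences"] exist (no KeyError)?
def pvHasOcc (level_stats : List (String × List (String × Int))) (l : String) : Bool :=
  (((PySem.Dict.ofList level_stats).get? l).bind (fun d => (PySem.Dict.ofList d).get? "occurrences")).isSome

-- Pre_ excludes exactly the inputs where Python A raises KeyError: the level keys A actually reads must be
-- present (a later level's key is never read once an earlier level already met the threshold).
def Pre_select_match_level_py (level_stats : List (String × List (String × Int))) (min_occurrences : Int) : Prop :=
  pvHasOcc level_stats "exact" = true ∧
    (pvOcc level_stats "exact" ≥ min_occurrences ∨
      (pvHasOcc level_stats "same_symbol" = true ∧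
        (pvOcc level_stats "same_symbol" ≥ min_occurrences ∨
          pvHasOcc level_stats "asset_class" = true)))
instance (level_stats : List (String × List (String × Int))) (min_occurrences : Int) : Decidable (Pre_select_match_level_py level_stats min_occurrences) := by unfold Pre_select_match_level_py; infer_instance

def pvWitness_select_match_level_py : (List (String × List (String × Int))) × Int :=
  ([("exact", [("occurrences", 1)]), ("same_symbol", [("occurrences", 2)]), ("asset_class", [("occurrences", 0)])], 3)

def Spec_select_match_level_py (level_stats : List (String × List (String × Int))) (min_occurrences : Int) (out : String) : Prop := out = select_match_level_py_alt level_stats min_occurrences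
instance (level_stats : List (String × List (String × Int))) (min_occurrences : Int) (out : String) : Decidable (Spec_select_match_level_py level_stats min_occurrences out) := by unfold Spec_select_match_level_py; infer_instance

-- ===== CLAIM (what is proved, stated in full; the proofs are below) =====
def Claim_equal_select_match_level_py : Prop := ∀ (level_stats : List (String × List (String × Int))) (min_occurrences : Int), Dom_select_match_level_py level_stats min_occurrences → Pre_select_match_level_py level_stats min_occurrences → Spec_select_match_level_py level_stats min_occurrences (select_match_level_py level_stats min_occurrences)

-- ===== LEMMAS AND PROOFS =====
-- Core fact: A's filter/sort/head fallback equals B's first-max scan with positivity post-check,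
-- for any occurrence function over the three fixed levels.
theorem pv_fallback_eq (f : String → Int) :
    (match PySem.List.sorted2 ((pvLevels.filter (fun l => f l > 0)).map (fun l => (l, f l)))
        (fun it => -it.2) (fun it => ((PySem.List.index? pvLevels it.1).getD 0 : Nat)) false with
      | [] => "exact"
      | p :: _ => p.1) =
    (if f ((PySem.List.max? pvLevels f).getD "exact") > 0
      then (PySem.List.max? pvLevels f).getD "exact" else "exact") := by
  have i0 : ((List.idxOf? "exact" ["exact", "same_symbol", "asset_class"]).getD 0) = 0 := by decide
  have i1 : ((List.idxOf? "same_symbol" ["exact", "same_symbol", "asset_class"]).getD 0) = 1 := by decide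
  have i2 : ((List.idxOf? "asset_class" ["exact", "same_symbol", "asset_class"]).getD 0) = 2 := by decide
  by_cases ha : f "exact" > 0 <;> by_cases hb : f "same_symbol" > 0 <;> by_cases hc : f "asset_class" > 0 <;>
  by_cases h1 : f "exact" < f "same_symbol" <;> by_cases h2 : f "same_symbol" < f "asset_class" <;>
  by_cases h3 : f "exact" < f "asset_class" <;>
    simp only [pvLevels, List.filter, List.map, ha, hb, hc, decide_true, decide_false] <;>
    simp [PySem.List.sorted2, PySem.List.insertBy, PySem.List.max?, i0, i1, i2,
      ha, hb, hc, h1, h2, h3] <;>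
    first
      | rfl
      | (exfalso; omega)

-- ===== VERDICT (by name: the statement is the Claim_ definition above) =====
theorem select_match_level_py_spec : Claim_equal_select_match_level_py := by
  intro ls mo _ _
  unfold Spec_select_match_level_py select_match_level_py select_match_level_py_alt
  split_ifs
  · rfl
  · rfl
  · rfl
  · exact pv_fallback_eq (pvOcc ls)
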